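-- pv_equiv track=rewrite | github.com/normster/torchllms | torchllms/messages/tokenization_harmony.py | _count_prefix_messages
-- ===== SOURCE A (Python) =====
-- from typing import Any, Dict, List, Optional, Sequence, Tuple
--
-- def _count_prefix_messages(conversation: List[Dict[str, Any]]) -> int:
--     """Return N such that conversation[:N] are all system/developer.
--
--     Raises if system/developer appears later in the conversation.
--     """
--     n = 0
--     for msg in conversation:
--         if msg.get("role") in ("system", "developer"):
--             n += 1
--         else:
--             break
--     for msg in conversation[n:]:
--         if msg.get("role") in ("system", "developer"):
--             raise ValueError(
--                 "system/developer messages must appear at the start of the "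
--                 "conversation (collapsed into a single Harmony DEVELOPER block)"
--             )
--     return n
-- ===== SOURCE B (Python) =====
-- def _count_prefix_messages(conversation):
--     # Count every system/developer message anywhere; if they all sit at the
--     # start, the first n flags are all True, otherwise some later sys/dev
--     # message pushed n past the prefix and the check fails.
--     flags = [msg.get("role") in ("system", "developer") for msg in conversation]
--     n = sum(flags)
--     if not all(flags[:n]):
--         raise ValueError(
--             "system/developer messages must appear at the start of the "
--             "conversation (collapsed into a single Harmony DEVELOPER block)"
--         )
--     return n
-- ===== Notes on version B (the rewrite author's own statement) =====
-- stated objective: alternative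
-- what changed: Instead of A's count-prefix-with-break then scan-the-suffix-for-violations, B counts ALL system/developer messages in the whole conversation and validates by checking that the first n flags are all True (total count exceeds the prefix exactly when a sys/dev message appears late).
import Mathlib
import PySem

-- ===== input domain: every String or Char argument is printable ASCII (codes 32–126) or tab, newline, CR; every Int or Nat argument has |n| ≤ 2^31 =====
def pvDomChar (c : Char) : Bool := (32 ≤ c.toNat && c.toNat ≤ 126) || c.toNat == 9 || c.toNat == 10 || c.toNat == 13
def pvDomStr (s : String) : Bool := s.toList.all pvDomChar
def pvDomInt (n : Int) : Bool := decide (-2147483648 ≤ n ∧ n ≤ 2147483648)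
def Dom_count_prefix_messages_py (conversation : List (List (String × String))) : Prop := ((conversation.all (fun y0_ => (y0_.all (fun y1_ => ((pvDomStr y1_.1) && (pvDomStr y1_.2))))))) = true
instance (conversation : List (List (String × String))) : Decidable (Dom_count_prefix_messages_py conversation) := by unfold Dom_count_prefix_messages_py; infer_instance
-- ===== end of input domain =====

-- B counts all system/developer messages globally and validates the prefix by length,
-- instead of A's count-prefix-with-break plus a second scan over the suffix; objective: alternative.

-- ===== PORT A =====
-- msg.get("role") in ("system", "developer")
def pvIsSysDev (msg : List (String × String)) : Bool :=
  let r := PySem.Dict.get? (PySem.Dict.mk msg) "role"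
  r == some "system" || r == some "developer"

-- A's first loop: count with break
def pvACount (conversation : List (List (String × String))) : Int :=
  match conversation with
  | [] => 0
  | msg :: rest => if pvIsSysDev msg then 1 + pvACount rest else 0

-- A's second loop over conversation[n:] only raises (ValueError) or does nothing;
-- on inputs satisfying Pre_ it never raises, so the returned value is n from the first loop.
def count_prefix_messages_py (conversation : List (List (String × String))) : Int :=
  pvACount conversation

-- ===== PORT B =====
-- flags = [is sys/dev for each msg]; n = sum(flags); the 'all(flags[:n])' check only
-- raises, and on inputs satisfying Pre_ it never does, so the value is n.
def count_prefix_messages_py_alt (conversation : List (List (String × String))) : Int :=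
  let flags := conversation.map pvIsSysDev
  ((flags.count true : Nat) : Int)

-- ===== PRECONDITION & SPEC =====
-- Pre_ excludes exactly the inputs on which A (and B) raise ValueError: a system/developer
-- message occurring after some non-system/developer message.
def Pre_count_prefix_messages_py (conversation : List (List (String × String))) : Prop :=
  conversation.Pairwise (fun a b => pvIsSysDev b → pvIsSysDev a)
instance (conversation : List (List (String × String))) : Decidable (Pre_count_prefix_messages_py conversation) := by unfold Pre_count_prefix_messages_py; infer_instance
def pvWitness_count_prefix_messages_py : (List (List (String × String))) :=
  [[("role", "system")], [("role", "developer")], [("role", "user")]]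

def Spec_count_prefix_messages_py (conversation : List (List (String × String))) (out : Int) : Prop := out = count_prefix_messages_py_alt conversation
instance (conversation : List (List (String × String))) (out : Int) : Decidable (Spec_count_prefix_messages_py conversation out) := by unfold Spec_count_prefix_messages_py; infer_instance

-- ===== CLAIM (what is proved, stated in full; the proofs are below) =====
def Claim_equal_count_prefix_messages_py : Prop := ∀ (conversation : List (List (String × String))), Dom_count_prefix_messages_py conversation → Pre_count_prefix_messages_py conversation → Spec_count_prefix_messages_py conversation (count_prefix_messages_py conversation)

-- ===== LEMMAS AND PROOFS =====
-- under Pre_, once a non-sys/dev message occurs, every later flag is false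
theorem pvACount_eq_count (conversation : List (List (String × String)))
    (h : Pre_count_prefix_messages_py conversation) :
    pvACount conversation = (((conversation.map pvIsSysDev).count true : Nat) : Int) := by
  induction conversation with
  | nil => rfl
  | cons m rest ih =>
    rcases List.pairwise_cons.mp h with ⟨hm, hrest⟩
    by_cases hs : pvIsSysDev m
    · simp [pvACount, hs, ih hrest]
      push_cast; ring
    · have hzero : (rest.map pvIsSysDev).count true = 0 := by
        rw [List.count_eq_zero]
        intro ht
        rcases List.mem_map.mp ht with ⟨x, hx, hxe⟩
        exact hs (hm x hx (by simpa using hxe))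
      simp [pvACount, hs, hzero]

-- ===== VERDICT (by name: the statement is the Claim_ definition above) =====
theorem count_prefix_messages_py_spec : Claim_equal_count_prefix_messages_py := by
  intro conv _ hpre
  unfold Spec_count_prefix_messages_py count_prefix_messages_py count_prefix_messages_py_alt
  simpa using pvACount_eq_count conv hpre
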